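-- pv_equiv track=rewrite | github.com/IOB-Muenster/uORFdb | uORF_detection/uORF_Finder/BASIC_FUNCTIONS.py | calculate_relative_coordinates
-- ===== SOURCE A (Python) =====
-- def calculate_relative_coordinates(exonStarts,exonEnds,strand,coordinate):
--
--     #input: exonStart and exonEnd coordinates + one coordinate that should be calculated as relative coordinate in this mRNA, respect of minus strand
--     exons_sum = 0
--
--     for i in range(0, len(exonStarts)):
--
--         if coordinate in range(exonStarts[i],exonEnds[i]+1):#coordinate is in exon
--             relative_coordinate = (exons_sum + (coordinate - exonStarts[i]))
--             exons_sum += (exonEnds[i] - exonStarts[i])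
--
--         elif i != (len(exonStarts)-1) and coordinate in range(exonEnds[i],exonStarts[i+1]+1):
--             exons_sum += (exonEnds[i] - exonStarts[i])
--             relative_coordinate = exons_sum
--
--         else:
--             exons_sum += (exonEnds[i] - exonStarts[i])
--
--     #reverse for minus strand
--     if strand == "-":
--         relative_coordinate = exons_sum - relative_coordinate
--
--     return(relative_coordinate)
-- ===== SOURCE B (Python) =====
-- def calculate_relative_coordinates(exonStarts, exonEnds, strand, coordinate):
--     # Two separate passes: one forward pass building exon-length prefix sums,
--     # then a backward scan that stops at the first (= A's last-wins) match.
--     n = len(exonStarts)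
--     acc = 0
--     prefix = [0]
--     for i in range(n):
--         acc += exonEnds[i] - exonStarts[i]
--         prefix.append(acc)
--     total = acc
--     rel = None
--     for i in range(n - 1, -1, -1):
--         if exonStarts[i] <= coordinate <= exonEnds[i]:
--             rel = prefix[i] + (coordinate - exonStarts[i])
--             break
--         if i != n - 1 and exonEnds[i] <= coordinate <= exonStarts[i + 1]:
--             rel = prefix[i + 1]
--             break
--     if rel is None:
--         raise ValueError("coordinate not within transcript")
--     return total - rel if strand == "-" else rel
-- ===== Notes on version B (the rewrite author's own statement) =====
-- stated objective: alternative
-- what changed: A interleaves matching and length accumulation in one forward last-wins loop; B first builds exon-length prefix sums in a forward pass, then scans backward and stops at the first match (equal to A's last match), computing the relative coordinate directly from the prefix sums.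
import Mathlib
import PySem

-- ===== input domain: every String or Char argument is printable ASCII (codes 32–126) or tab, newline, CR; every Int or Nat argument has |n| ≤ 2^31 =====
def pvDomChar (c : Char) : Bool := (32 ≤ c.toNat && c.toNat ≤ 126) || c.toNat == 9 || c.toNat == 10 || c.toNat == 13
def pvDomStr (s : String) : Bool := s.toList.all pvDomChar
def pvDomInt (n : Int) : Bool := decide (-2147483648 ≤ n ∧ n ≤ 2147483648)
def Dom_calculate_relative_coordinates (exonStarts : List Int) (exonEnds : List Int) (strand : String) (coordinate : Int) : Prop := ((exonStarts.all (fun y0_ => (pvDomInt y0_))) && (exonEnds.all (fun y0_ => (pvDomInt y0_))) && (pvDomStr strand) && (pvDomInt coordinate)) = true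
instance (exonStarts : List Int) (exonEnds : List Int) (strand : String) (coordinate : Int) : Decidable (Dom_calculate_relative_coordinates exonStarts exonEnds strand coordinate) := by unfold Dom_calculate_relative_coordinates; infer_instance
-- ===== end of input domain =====

-- B builds the exon-length prefix sums in one pass, then scans backward for the first match;
-- A's single forward loop overwrites on every match (last-wins), so the two agree. (objective: alternative)

-- ===== PORT A =====
-- Python's `coordinate in range(a, b+1)` is exactly `a ≤ coordinate ∧ coordinate ≤ b` for ints.
-- Indexing uses getD: Pre_ guarantees every accessed index is in range (else Python raises IndexError),
-- and the final `Option.getD 0` covers the never-assigned case (Python raises UnboundLocalError), also outside Pre_.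
def calculate_relative_coordinates (exonStarts : List Int) (exonEnds : List Int) (strand : String) (coordinate : Int) : Int :=
  let n := exonStarts.length
  let st := (List.range n).foldl (fun (st : Int × Option Int) (i : Nat) =>
    let s := exonStarts.getD i 0
    let e := exonEnds.getD i 0
    if s ≤ coordinate ∧ coordinate ≤ e then
      (st.1 + (e - s), some (st.1 + (coordinate - s)))
    else if i ≠ n - 1 ∧ e ≤ coordinate ∧ coordinate ≤ exonStarts.getD (i+1) 0 then
      (st.1 + (e - s), some (st.1 + (e - s)))
    else
      (st.1 + (e - s), st.2)) ((0 : Int), (none : Option Int))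
  let rel := st.2.getD 0
  if strand == "-" then st.1 - rel else rel

-- ===== PORT B =====
-- Pass 1 builds the prefix-sum list (Source B's `prefix`); pass 2 is the backward scan with break
-- (findSome? over the reversed range); `none` = Source B's ValueError, excluded by Pre_.
def calculate_relative_coordinates_alt (exonStarts : List Int) (exonEnds : List Int) (strand : String) (coordinate : Int) : Int :=
  let n := exonStarts.length
  let pr := (List.range n).foldl (fun (st : Int × List Int) (i : Nat) =>
      let a := st.1 + (exonEnds.getD i 0 - exonStarts.getD i 0)
      (a, st.2 ++ [a])) ((0 : Int), ([0] : List Int))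
  let total := pr.1
  let rel? := ((List.range n).reverse).findSome? (fun i =>
      if exonStarts.getD i 0 ≤ coordinate ∧ coordinate ≤ exonEnds.getD i 0 then
        some (pr.2.getD i 0 + (coordinate - exonStarts.getD i 0))
      else if i ≠ n - 1 ∧ exonEnds.getD i 0 ≤ coordinate ∧ coordinate ≤ exonStarts.getD (i+1) 0 then
        some (pr.2.getD (i+1) 0)
      else none)
  let rel := rel?.getD 0
  if strand == "-" then total - rel else rel

-- ===== PRECONDITION & SPEC =====
-- Pre_ excludes exactly the inputs where A raises: exonEnds shorter than exonStarts (IndexError),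
-- and coordinates matching no exon or inter-exon gap (UnboundLocalError).
def Pre_calculate_relative_coordinates (exonStarts : List Int) (exonEnds : List Int) (strand : String) (coordinate : Int) : Prop :=
  exonStarts.length ≤ exonEnds.length ∧
  ∃ i < exonStarts.length,
    (exonStarts.getD i 0 ≤ coordinate ∧ coordinate ≤ exonEnds.getD i 0) ∨
    (i ≠ exonStarts.length - 1 ∧ exonEnds.getD i 0 ≤ coordinate ∧ coordinate ≤ exonStarts.getD (i+1) 0)
instance (exonStarts : List Int) (exonEnds : List Int) (strand : String) (coordinate : Int) : Decidable (Pre_calculate_relative_coordinates exonStarts exonEnds strand coordinate) := by unfold Pre_calculate_relative_coordinates; infer_instance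

def pvWitness_calculate_relative_coordinates : List Int × List Int × String × Int := ([0, 20], [10, 30], "-", 5)

def Spec_calculate_relative_coordinates (exonStarts : List Int) (exonEnds : List Int) (strand : String) (coordinate : Int) (out : Int) : Prop := out = calculate_relative_coordinates_alt exonStarts exonEnds strand coordinate
instance (exonStarts : List Int) (exonEnds : List Int) (strand : String) (coordinate : Int) (out : Int) : Decidable (Spec_calculate_relative_coordinates exonStarts exonEnds strand coordinate out) := by unfold Spec_calculate_relative_coordinates; infer_instance

-- ===== CLAIM (what is proved, stated in full; the proofs are below) =====
def Claim_equal_calculate_relative_coordinates : Prop := ∀ (exonStarts : List Int) (exonEnds : List Int) (strand : String) (coordinate : Int), Dom_calculate_relative_coordinates exonStarts exonEnds strand coordinate → Pre_calculate_relative_coordinates exonStarts exonEnds strand coordinate → Spec_calculate_relative_coordinates exonStarts exonEnds strand coordinate (calculate_relative_coordinates exonStarts exonEnds strand coordinate)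

-- ===== LEMMAS AND PROOFS =====

-- prefix sum of exon lengths over the first i exons
def pvP (es ee : List Int) (i : Nat) : Int :=
  ((List.range i).map (fun j => ee.getD j 0 - es.getD j 0)).sum

-- the match result at index i (what A assigns at step i, what B's backward scan probes)
def pvM (es ee : List Int) (c : Int) (i : Nat) : Option Int :=
  if es.getD i 0 ≤ c ∧ c ≤ ee.getD i 0 then some (pvP es ee i + (c - es.getD i 0))
  else if i ≠ es.length - 1 ∧ ee.getD i 0 ≤ c ∧ c ≤ es.getD (i+1) 0 then some (pvP es ee (i+1))
  else none

lemma pvP_succ (es ee : List Int) (i : Nat) :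
    pvP es ee (i+1) = pvP es ee i + (ee.getD i 0 - es.getD i 0) := by
  simp [pvP, List.range_succ]

lemma foldA_eq (es ee : List Int) (c : Int) (m : Nat) :
    (List.range m).foldl (fun (st : Int × Option Int) (i : Nat) =>
      let s := es.getD i 0
      let e := ee.getD i 0
      if s ≤ c ∧ c ≤ e then
        (st.1 + (e - s), some (st.1 + (c - s)))
      else if i ≠ es.length - 1 ∧ e ≤ c ∧ c ≤ es.getD (i+1) 0 then
        (st.1 + (e - s), some (st.1 + (e - s)))
      else
        (st.1 + (e - s), st.2)) ((0 : Int), (none : Option Int))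
    = (pvP es ee m, ((List.range m).reverse).findSome? (pvM es ee c)) := by
  induction m with
  | zero => simp [pvP]
  | succ m ih =>
      rw [List.range_succ, List.foldl_append, ih, List.reverse_append]
      simp only [List.reverse_cons, List.reverse_nil, List.nil_append, List.singleton_append,
        List.foldl_cons, List.foldl_nil, List.findSome?_cons]
      unfold pvM
      split_ifs with h1 h2 <;>
        simp [pvP_succ]

lemma foldB_eq (es ee : List Int) (m : Nat) :
    (List.range m).foldl (fun (st : Int × List Int) (i : Nat) =>
      let a := st.1 + (ee.getD i 0 - es.getD i 0)
      (a, st.2 ++ [a])) ((0 : Int), ([0] : List Int))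
    = (pvP es ee m, (List.range (m+1)).map (pvP es ee)) := by
  induction m with
  | zero => simp [pvP]
  | succ m ih =>
      rw [List.range_succ, List.foldl_append, ih]
      simp only [List.foldl_cons, List.foldl_nil]
      refine Prod.ext ?_ ?_
      · simp [pvP_succ]
      · show _ ++ _ = _
        rw [List.range_succ (n := m+1), List.map_append]
        simp [pvP_succ]

lemma prefix_getD (es ee : List Int) (m i : Nat) (h : i < m + 1) :
    ((List.range (m+1)).map (pvP es ee)).getD i 0 = pvP es ee i := by
  rw [List.getD_eq_getElem?_getD, List.getElem?_map, List.getElem?_range h]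
  rfl

lemma findSome?_congr {α β : Type} (l : List α) (f g : α → Option β)
    (h : ∀ x ∈ l, f x = g x) : l.findSome? f = l.findSome? g := by
  induction l with
  | nil => rfl
  | cons a l ih =>
      simp only [List.findSome?_cons, h a (List.mem_cons_self ..)]
      cases g a with
      | none => exact ih (fun x hx => h x (List.mem_cons_of_mem _ hx))
      | some b => rfl

lemma ports_agree (es ee : List Int) (strand : String) (c : Int) :
    calculate_relative_coordinates es ee strand c
      = calculate_relative_coordinates_alt es ee strand c := by
  simp only [calculate_relative_coordinates, calculate_relative_coordinates_alt]
  rw [foldA_eq es ee c es.length, foldB_eq es ee es.length]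
  have hcong : ((List.range es.length).reverse).findSome? (fun i =>
      if es.getD i 0 ≤ c ∧ c ≤ ee.getD i 0 then
        some (((List.range (es.length+1)).map (pvP es ee)).getD i 0 + (c - es.getD i 0))
      else if i ≠ es.length - 1 ∧ ee.getD i 0 ≤ c ∧ c ≤ es.getD (i+1) 0 then
        some (((List.range (es.length+1)).map (pvP es ee)).getD (i+1) 0)
      else none)
    = ((List.range es.length).reverse).findSome? (pvM es ee c) := by
    apply findSome?_congr
    intro i hi
    rw [List.mem_reverse, List.mem_range] at hi
    unfold pvM
    rw [prefix_getD es ee es.length i (Nat.lt_succ_of_lt hi),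
        prefix_getD es ee es.length (i+1) (Nat.succ_lt_succ hi)]
  simp only [hcong]

-- ===== VERDICT (by name: the statement is the Claim_ definition above) =====
theorem calculate_relative_coordinates_spec : Claim_equal_calculate_relative_coordinates := by
  intro es ee strand c _ _
  unfold Spec_calculate_relative_coordinates
  exact ports_agree es ee strand c
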